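-- pv_equiv track=rewrite | github.com/WhoTho/Side-Projects | btd6/runner.py | calculateEta
-- ===== SOURCE A (Python) =====
-- def calculateEta(gameData):
--     modeTimes = {
--         "easy": 4 * 60 + 46,
--         "primaryOnly": 4 * 60 + 46,
--         "deflation": 4 * 60 + 46,
--         "medium": 7 * 60 + 53,
--         "militaryOnly": 7 * 60 + 53,
--         "apop": 7 * 60 + 26,
--         "reverse": 7 * 60 + 53,
--         "hard": 11 * 60 + 50,
--         "magicOnly": 11 * 60 + 50,
--         "doubleHpMoabs": 12 * 60,
--         "halfCash": 11 * 60 + 50,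
--         "abr": 11 * 60 + 50,
--         "impoppable": 14 * 60 + 23,
--         "chimps": 15 * 60 + 45,
--     }
--
--     totalTime = 0
--     for _, _, _, mode in gameData:
--         totalTime += modeTimes[mode]
--         totalTime += 20
--
--     return totalTime
-- ===== SOURCE B (Python) =====
-- def calculateEta(gameData):
--     modeTimes = {
--         "easy": 4 * 60 + 46,
--         "primaryOnly": 4 * 60 + 46,
--         "deflation": 4 * 60 + 46,
--         "medium": 7 * 60 + 53,
--         "militaryOnly": 7 * 60 + 53,
--         "apop": 7 * 60 + 26,
--         "reverse": 7 * 60 + 53,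
--         "hard": 11 * 60 + 50,
--         "magicOnly": 11 * 60 + 50,
--         "doubleHpMoabs": 12 * 60,
--         "halfCash": 11 * 60 + 50,
--         "abr": 11 * 60 + 50,
--         "impoppable": 14 * 60 + 23,
--         "chimps": 15 * 60 + 45,
--     }
--
--     counts = {}
--     for _, _, _, mode in gameData:
--         counts[mode] = counts.get(mode, 0) + 1
--
--     total = 20 * len(gameData)
--     for mode, c in counts.items():
--         total += c * modeTimes[mode]
--     return total
-- ===== Notes on version B (the rewrite author's own statement) =====
-- stated objective: alternative
-- what changed: B first builds a frequency table of modes in one pass, then sums count * modeTimes[mode] over the distinct modes plus a single 20 * len(gameData) term, instead of A's per-row lookup-and-accumulate loop.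
import Mathlib
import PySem

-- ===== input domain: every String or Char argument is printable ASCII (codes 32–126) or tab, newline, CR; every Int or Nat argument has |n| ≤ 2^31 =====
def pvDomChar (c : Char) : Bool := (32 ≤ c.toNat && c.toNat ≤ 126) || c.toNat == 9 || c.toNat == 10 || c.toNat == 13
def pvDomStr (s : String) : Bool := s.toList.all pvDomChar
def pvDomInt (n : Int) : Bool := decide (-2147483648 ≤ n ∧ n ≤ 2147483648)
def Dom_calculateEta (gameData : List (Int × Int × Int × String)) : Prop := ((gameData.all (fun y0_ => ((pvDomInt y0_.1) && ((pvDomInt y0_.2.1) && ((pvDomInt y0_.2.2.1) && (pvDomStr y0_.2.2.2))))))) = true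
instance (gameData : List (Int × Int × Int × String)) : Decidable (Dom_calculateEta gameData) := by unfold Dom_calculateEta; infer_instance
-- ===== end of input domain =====

-- B counts the modes once, then sums count * modeTimes[mode] over the distinct modes plus 20 * len(gameData); alternative decomposition, same cost. Return-value equivalence.
-- Pre_ excludes inputs where A raises KeyError (a mode outside the 14-key table); B raises there too.


-- the mode→time table both Pythons write as the same dict literal
def pvModeTimes : PySem.Dict String Int := PySem.Dict.ofList
  [("easy", 4 * 60 + 46), ("primaryOnly", 4 * 60 + 46), ("deflation", 4 * 60 + 46),
   ("medium", 7 * 60 + 53), ("militaryOnly", 7 * 60 + 53), ("apop", 7 * 60 + 26),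
   ("reverse", 7 * 60 + 53), ("hard", 11 * 60 + 50), ("magicOnly", 11 * 60 + 50),
   ("doubleHpMoabs", 12 * 60), ("halfCash", 11 * 60 + 50), ("abr", 11 * 60 + 50),
   ("impoppable", 14 * 60 + 23), ("chimps", 15 * 60 + 45)]

-- ===== PORT A =====
-- 'modeTimes[mode]' = Dict.get?; none = KeyError, so the loop returns Option Int
def calculateEta_loop (gd : List (Int × Int × Int × String)) (total : Int) : Option Int :=
  match gd with
  | [] => some total
  | (_, _, _, m) :: rest =>
    match pvModeTimes.get? m with
    | none => none
    | some t => calculateEta_loop rest (total + t + 20)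

def calculateEta (gameData : List (Int × Int × Int × String)) : Int :=
  (calculateEta_loop gameData 0).getD 0

-- ===== PORT B =====
-- first loop: counts[mode] = counts.get(mode, 0) + 1; second loop folds over counts.items()
-- (modeTimes[mode] = get?; none = KeyError, so the second loop carries an Option)
def calculateEta_alt (gameData : List (Int × Int × Int × String)) : Int :=
  let counts : PySem.Dict String Int :=
    gameData.foldl (fun d r => d.insert r.2.2.2 (d.getD r.2.2.2 0 + 1)) PySem.Dict.empty
  let total : Option Int :=
    counts.items.foldl
      (fun acc mc =>
        match acc, pvModeTimes.get? mc.1 with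
        | some tot, some t => some (tot + mc.2 * t)
        | _, _ => none)
      (some (20 * (gameData.length : Int)))
  total.getD 0

-- ===== PRECONDITION & SPEC =====
def pvKeys : List String :=
  ["easy", "primaryOnly", "deflation", "medium", "militaryOnly", "apop", "reverse",
   "hard", "magicOnly", "doubleHpMoabs", "halfCash", "abr", "impoppable", "chimps"]

-- excluded: rows whose mode is not one of the 14 table keys — there A raises KeyError
def Pre_calculateEta (gameData : List (Int × Int × Int × String)) : Prop :=
  ∀ r ∈ gameData, r.2.2.2 ∈ pvKeys
instance (gameData : List (Int × Int × Int × String)) : Decidable (Pre_calculateEta gameData) := by unfold Pre_calculateEta; infer_instance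

def pvWitness_calculateEta : (List (Int × Int × Int × String)) :=
  [(1, 2, 3, "easy"), (0, 0, 0, "chimps")]

def Spec_calculateEta (gameData : List (Int × Int × Int × String)) (out : Int) : Prop := out = calculateEta_alt gameData
instance (gameData : List (Int × Int × Int × String)) (out : Int) : Decidable (Spec_calculateEta gameData out) := by unfold Spec_calculateEta; infer_instance

-- ===== CLAIM =====
def Claim_equal_calculateEta : Prop := ∀ (gameData : List (Int × Int × Int × String)), Dom_calculateEta gameData → Pre_calculateEta gameData → Spec_calculateEta gameData (calculateEta gameData)

-- ===== LEMMAS AND PROOFS =====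

-- per-mode time as a total function (agrees with get? on pvKeys)
def pvT (m : String) : Int := pvModeTimes.getD m 0

lemma pv_get_of_key (x : String) (hx : x ∈ pvKeys) :
    pvModeTimes.get? x = some (pvT x) := by
  simp only [pvKeys, List.mem_cons, List.not_mem_nil, or_false] at hx
  rcases hx with rfl | rfl | rfl | rfl | rfl | rfl | rfl | rfl | rfl | rfl | rfl | rfl | rfl | rfl <;> decide

-- A's loop computes acc + Σ_rows pvT(mode) + 20·n
lemma pv_loopA (gd : List (Int × Int × Int × String))
    (hpre : ∀ r ∈ gd, r.2.2.2 ∈ pvKeys) : ∀ acc : Int,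
    calculateEta_loop gd acc
      = some (acc + ((gd.map (fun r => pvT r.2.2.2)).sum) + 20 * (gd.length : Int)) := by
  induction gd with
  | nil => intro acc; simp [calculateEta_loop]
  | cons hd tl ih =>
    intro acc
    obtain ⟨_, _, _, m⟩ := hd
    rw [calculateEta_loop, pv_get_of_key m (hpre _ (List.mem_cons_self ..))]
    dsimp only
    rw [ih (fun r hr => hpre r (List.mem_cons_of_mem _ hr))]
    congr 1
    simp only [List.map_cons, List.sum_cons, List.length_cons]
    push_cast
    ring

-- B's second loop succeeds and adds the weighted sum, given every key is in the table
lemma pv_loopB (L : List (String × Int)) (hL : ∀ p ∈ L, p.1 ∈ pvKeys) : ∀ i : Int,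
    L.foldl
      (fun acc mc =>
        match acc, pvModeTimes.get? mc.1 with
        | some tot, some t => some (tot + mc.2 * t)
        | _, _ => none)
      (some i)
      = some (i + (L.map (fun mc => mc.2 * pvT mc.1)).sum) := by
  induction L with
  | nil => intro i; simp
  | cons p L ih =>
    intro i
    rw [List.foldl_cons, pv_get_of_key p.1 (hL _ (List.mem_cons_self ..))]
    dsimp only
    rw [ih (fun q hq => hL q (List.mem_cons_of_mem _ hq))]
    simp only [List.map_cons, List.sum_cons]
    congr 1
    ring

-- grouping: Σ over distinct modes of count·f = Σ over all modes of f
lemma pv_group (l : List String) (f : String → Int) :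
    ((PySem.Set.ofList l).map (fun k => (l.count k : Int) * f k)).sum = (l.map f).sum := by
  have hnd : (PySem.Set.ofList l).Nodup := PySem.Set.nodup_ofList l
  have htf : (PySem.Set.ofList l).toFinset = l.toFinset := by
    ext x; simp [PySem.Set.mem_ofList]
  calc ((PySem.Set.ofList l).map (fun k => (l.count k : Int) * f k)).sum
      = (PySem.Set.ofList l).toFinset.sum (fun k => (l.count k : Int) * f k) :=
        (List.sum_toFinset _ hnd).symm
    _ = l.toFinset.sum (fun k => (l.count k : Int) * f k) := by rw [htf]
    _ = l.toFinset.sum (fun k => l.count k • f k) := by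
        refine Finset.sum_congr rfl (fun k _ => ?_)
        rw [nsmul_eq_mul]
    _ = (l.map f).sum := (Finset.sum_list_map_count l f).symm

-- ===== VERDICT =====
theorem calculateEta_spec : Claim_equal_calculateEta := by
  intro gd _ hpre
  unfold Spec_calculateEta calculateEta calculateEta_alt
  have hmodes : gd.foldl (fun d r => d.insert r.2.2.2 (d.getD r.2.2.2 0 + 1)) PySem.Dict.empty
      = PySem.Dict.counter (gd.map (fun r => r.2.2.2)) := by
    rw [← PySem.Dict.foldl_insert_getD_add_one_eq_counter, List.foldl_map]
  rw [pv_loopA gd hpre 0, hmodes]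
  dsimp only
  rw [PySem.Dict.items_counter]
  have hkeys : ∀ p ∈ (PySem.Set.ofList (gd.map (fun r => r.2.2.2))).map
      (fun k => (k, ((gd.map (fun r => r.2.2.2)).count k : Int))), p.1 ∈ pvKeys := by
    intro p hp
    obtain ⟨k, hk, rfl⟩ := List.mem_map.mp hp
    obtain ⟨r, hr, rfl⟩ := List.mem_map.mp ((PySem.Set.mem_ofList ..).mp hk)
    exact hpre r hr
  rw [pv_loopB _ hkeys]
  have := pv_group (gd.map (fun r => r.2.2.2)) pvT
  simp only [Option.getD_some, List.map_map, Function.comp_def] at this ⊢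
  rw [this]
  ring
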